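-- pv_equiv track=rewrite | github.com/MahikaJaguste/msc-thesis | patient_community_project/scripts/run_perturbation.py | make_disjoint_clustering
-- ===== SOURCE A (Python) =====
-- from collections import defaultdict
--
-- def make_disjoint_clustering(membership_dict):
--     disjoint_communities = defaultdict(list)
--     assigned_nodes = set()
--     for comm_id in sorted(set(c for comms in membership_dict.values() for c in comms)):
--         for node, comms in membership_dict.items():
--             if node not in assigned_nodes and comm_id in comms:
--                 disjoint_communities[comm_id].append(node)
--                 assigned_nodes.add(node)
--     return list(disjoint_communities.values())
-- ===== SOURCE B (Python) =====
-- def make_disjoint_clustering(membership_dict):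
--     groups = {}
--     for node, comms in membership_dict.items():
--         if comms:
--             groups.setdefault(min(comms), []).append(node)
--     return [groups[c] for c in sorted(groups)]
-- ===== Notes on version B (the rewrite author's own statement) =====
-- stated objective: faster
-- what changed: Replaces the outer loop over every community id (each rescanning all nodes) by a single pass that assigns each node to min(comms) into a dict keyed by community, then emits the groups in sorted key order.
import Mathlib
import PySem

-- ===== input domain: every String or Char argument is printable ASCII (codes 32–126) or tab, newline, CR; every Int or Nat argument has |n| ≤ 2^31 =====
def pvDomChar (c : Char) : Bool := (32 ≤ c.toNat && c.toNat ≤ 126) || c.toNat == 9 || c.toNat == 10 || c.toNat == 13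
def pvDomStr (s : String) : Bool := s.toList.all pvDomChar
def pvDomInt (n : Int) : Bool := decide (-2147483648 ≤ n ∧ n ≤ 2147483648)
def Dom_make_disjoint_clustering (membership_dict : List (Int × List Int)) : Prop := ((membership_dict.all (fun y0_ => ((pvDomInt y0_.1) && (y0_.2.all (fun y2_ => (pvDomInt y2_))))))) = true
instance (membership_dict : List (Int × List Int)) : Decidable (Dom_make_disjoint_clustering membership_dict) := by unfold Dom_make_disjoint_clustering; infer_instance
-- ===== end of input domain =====

-- B replaces A's loop over every community id (each pass rescanning all nodes) by a single
-- pass assigning each node to min(comms), grouped in a dict and emitted in sorted key order.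
-- Both ports read the dict argument as PySem.Dict.ofList of the association list (Python dict semantics).

-- ===== PORT A =====
-- one iteration of A's inner 'for node, comms in membership_dict.items()' loop
def pvStepA (comm : Int) (st : PySem.Dict Int (List Int) × PySem.Set Int) (p : Int × List Int) :
    PySem.Dict Int (List Int) × PySem.Set Int :=
  if !(PySem.Set.contains st.2 p.1) && p.2.contains comm then
    (st.1.modify comm [] (fun l => l ++ [p.1]), PySem.Set.add st.2 p.1)
  else st

def make_disjoint_clustering (membership_dict : List (Int × List Int)) : List (List Int) :=
  let d := PySem.Dict.ofList membership_dict
  let allComms := PySem.List.sorted (PySem.Set.ofList (d.items.flatMap (fun p => p.2))) (fun x => x) false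
  (allComms.foldl (fun st comm => d.items.foldl (pvStepA comm) st)
    (PySem.Dict.empty, PySem.Set.empty)).1.values

-- ===== PORT B =====
-- one iteration of B's single 'for node, comms in membership_dict.items()' loop
def pvStepB (g : PySem.Dict Int (List Int)) (p : Int × List Int) : PySem.Dict Int (List Int) :=
  match PySem.List.min? p.2 (fun x => x) with
  | none => g
  | some m => g.insert m (g.getD m [] ++ [p.1])

def make_disjoint_clustering_alt (membership_dict : List (Int × List Int)) : List (List Int) :=
  let d := PySem.Dict.ofList membership_dict
  let groups := d.items.foldl pvStepB PySem.Dict.empty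
  (PySem.List.sorted groups.keys (fun x => x) false).map (fun c => groups.getD c [])

-- ===== PRECONDITION & SPEC =====
def Spec_make_disjoint_clustering (membership_dict : List (Int × List Int)) (out : List (List Int)) : Prop := out = make_disjoint_clustering_alt membership_dict
instance (membership_dict : List (Int × List Int)) (out : List (List Int)) : Decidable (Spec_make_disjoint_clustering membership_dict out) := by unfold Spec_make_disjoint_clustering; infer_instance

-- ===== CLAIM (what is proved, stated in full; the proofs are below) =====
def Claim_equal_make_disjoint_clustering : Prop := ∀ (membership_dict : List (Int × List Int)), Dom_make_disjoint_clustering membership_dict → Spec_make_disjoint_clustering membership_dict (make_disjoint_clustering membership_dict)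

-- ===== LEMMAS AND PROOFS =====

-- the minimum of a comms list (min(comms) in Python)
def pvMin (cs : List Int) : Option Int := PySem.List.min? cs (fun x => x)
-- the nodes of L whose minimal community is c, in L's order
def pvGroup (L : List (Int × List Int)) (c : Int) : List Int :=
  (L.filter (fun p => pvMin p.2 == some c)).map (fun p => p.1)
-- all minimal communities, with multiplicity
def pvMins (L : List (Int × List Int)) : List Int := L.filterMap (fun p => pvMin p.2)
-- the sorted distinct community ids
def pvS (L : List (Int × List Int)) : List Int :=
  PySem.List.sorted (PySem.Set.ofList (L.flatMap (fun p => p.2))) (fun x => x) false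
-- the common canonical form of both results
def pvCanon (L : List (Int × List Int)) : List (List Int) :=
  ((pvS L).filter (fun c => decide (c ∈ pvMins L))).map (pvGroup L)

theorem pvKeyInj {L : List (Int × List Int)} (h : (L.map Prod.fst).Nodup)
    {p q : Int × List Int} (hp : p ∈ L) (hq : q ∈ L) (hpq : p.1 = q.1) : p = q :=
  List.inj_on_of_nodup_map h hp hq hpq

-- folding repeated appends at one key is a single insert
theorem pvFoldModify (c : Int) (ns : List Int) (dc : PySem.Dict Int (List Int)) (h : ns ≠ []) :
    ns.foldl (fun dc n => dc.modify c [] (fun l => l ++ [n])) dc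
      = dc.insert c (dc.getD c [] ++ ns) := by
  induction ns generalizing dc with
  | nil => exact absurd rfl h
  | cons x t ih =>
    cases t with
    | nil => rfl
    | cons y u =>
      rw [List.foldl_cons, ih _ (by simp)]
      show ((dc.modify c [] _).insert c _) = _
      rw [PySem.Dict.modify]
      simp [PySem.Dict.insert_insert_self, PySem.Dict.getD_insert_self]

-- A's inner loop: exactly the nodes with minimal community c get appended
theorem pvInner (c : Int) (P : List Int) (hcP : c ∉ P) :
    ∀ (ls : List (Int × List Int)) (dc : PySem.Dict Int (List Int)) (as : PySem.Set Int),
    (ls.map Prod.fst).Nodup →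
    (∀ p ∈ ls, (PySem.Set.contains as p.1 = true ↔ ∃ c' ∈ P, pvMin p.2 = some c')) →
    (∀ p ∈ ls, ∀ m, pvMin p.2 = some m → m < c → m ∈ P) →
    ls.foldl (pvStepA c) (dc, as)
      = ((ls.filter (fun p => pvMin p.2 == some c)).foldl
            (fun dc p => dc.modify c [] (fun l => l ++ [p.1])) dc,
         PySem.Set.update as ((ls.filter (fun p => pvMin p.2 == some c)).map Prod.fst)) := by
  intro ls
  induction ls with
  | nil => intro dc as _ _ _; simp [PySem.Set.update]
  | cons p t ih =>
    intro dc as hnd hinv hsm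
    have hcond : (!(PySem.Set.contains as p.1) && p.2.contains c) = (pvMin p.2 == some c) := by
      apply Bool.eq_iff_iff.mpr
      constructor
      · intro h
        have h1 : ¬ PySem.Set.contains as p.1 = true := by
          simpa using (Bool.and_eq_true_iff.mp h).1
        have hmem : c ∈ p.2 := by
          simpa using (Bool.and_eq_true_iff.mp h).2
        obtain ⟨m, hm⟩ : ∃ m, pvMin p.2 = some m := by
          cases hmm : pvMin p.2 with
          | none =>
            exact absurd ((PySem.List.min?_eq_none_iff _ _).mp hmm)
              (by intro e; rw [e] at hmem; cases hmem)
          | some m => exact ⟨m, rfl⟩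
        have hle : m ≤ c := PySem.List.min?_isMin hm c hmem
        rcases lt_or_eq_of_le hle with hlt | heq
        · exact absurd ((hinv p (List.mem_cons_self)).mpr
            ⟨m, hsm p (List.mem_cons_self) m hm hlt, hm⟩) h1
        · rw [hm, heq]; simp
      · intro h
        have hm : pvMin p.2 = some c := by simpa using h
        have hc2 : c ∈ p.2 := PySem.List.min?_mem hm
        have h1 : ¬ PySem.Set.contains as p.1 = true := by
          intro hcon
          obtain ⟨c', hc'P, hmc'⟩ := (hinv p List.mem_cons_self).mp hcon
          rw [hm] at hmc'
          cases hmc'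
          exact hcP hc'P
        simp [hc2]
        exact fun hmem => h1 ((PySem.Set.contains_iff _ _).mpr hmem)
    have hndt : (t.map Prod.fst).Nodup := (by simpa using hnd : _ ∧ _).2
    have hp1t : p.1 ∉ t.map Prod.fst := (by simpa using hnd : _ ∧ _).1
    rw [List.foldl_cons]
    by_cases hm : pvMin p.2 = some c
    · have hstep : pvStepA c (dc, as) p
          = (dc.modify c [] fun l => l ++ [p.1], PySem.Set.add as p.1) := by
        unfold pvStepA
        rw [hcond]
        simp [hm]
      rw [hstep]
      rw [ih _ _ hndt ?_ (fun q hq => hsm q (List.mem_cons_of_mem _ hq))]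
      · simp [hm, PySem.Set.update_cons]
      · intro q hq
        rw [← hinv q (List.mem_cons_of_mem _ hq)]
        have hne : q.1 ≠ p.1 := by
          intro e
          exact hp1t (e ▸ List.mem_map_of_mem hq)
        constructor
        · intro hcon
          rcases (PySem.Set.mem_add _ _ _).mp ((PySem.Set.contains_iff _ _).mp hcon) with hin | he
          · exact (PySem.Set.contains_iff _ _).mpr hin
          · exact absurd he hne
        · intro hcon
          exact (PySem.Set.contains_iff _ _).mpr
            ((PySem.Set.mem_add _ _ _).mpr (Or.inl ((PySem.Set.contains_iff _ _).mp hcon)))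
    · have hstep : pvStepA c (dc, as) p = (dc, as) := by
        unfold pvStepA
        rw [hcond]
        simp [hm]
      rw [hstep]
      rw [ih _ _ hndt (fun q hq => hinv q (List.mem_cons_of_mem _ hq))
        (fun q hq => hsm q (List.mem_cons_of_mem _ hq))]
      simp [hm]

-- A's outer loop invariant
theorem pvOuter (L : List (Int × List Int)) (hnd : (L.map Prod.fst).Nodup)
    (hpw : (pvS L).Pairwise (· < ·)) :
    ∀ (R P : List Int) (dc : PySem.Dict Int (List Int)) (as : PySem.Set Int),
    pvS L = P ++ R →
    dc.items = (P.filter (fun c => decide (c ∈ pvMins L))).map (fun c => (c, pvGroup L c)) →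
    (∀ n, PySem.Set.contains as n = true ↔ ∃ p ∈ L, p.1 = n ∧ ∃ c' ∈ P, pvMin p.2 = some c') →
    (R.foldl (fun st comm => L.foldl (pvStepA comm) st) (dc, as)).1.items
      = ((P ++ R).filter (fun c => decide (c ∈ pvMins L))).map (fun c => (c, pvGroup L c)) := by
  intro R
  induction R with
  | nil => intro P dc as hS hdc has; simpa using hdc
  | cons c R' ihR =>
    intro P dc as hS hdc has
    have hpw' : (P ++ c :: R').Pairwise (· < ·) := hS ▸ hpw
    have hcross : ∀ a ∈ P, ∀ b ∈ c :: R', a < b := (List.pairwise_append.mp hpw').2.2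
    have hsuf : (c :: R').Pairwise (· < ·) := (List.pairwise_append.mp hpw').2.1
    have hcR' : ∀ b ∈ R', c < b := (List.pairwise_cons.mp hsuf).1
    have hcP : c ∉ P := fun h => lt_irrefl c (hcross c h c List.mem_cons_self)
    have hsm : ∀ p ∈ L, ∀ m, pvMin p.2 = some m → m < c → m ∈ P := by
      intro p hp m hm hlt
      have hmS : m ∈ pvS L := by
        have hmf : m ∈ L.flatMap (fun q => q.2) :=
          List.mem_flatMap.mpr ⟨p, hp, PySem.List.min?_mem hm⟩
        simp [pvS, PySem.List.mem_sorted, PySem.Set.mem_ofList, hmf]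
      rw [hS] at hmS
      rcases List.mem_append.mp hmS with h | h
      · exact h
      · rcases List.mem_cons.mp h with h | h
        · exact absurd (h ▸ hlt) (lt_irrefl c)
        · exact absurd (lt_trans hlt (hcR' m h)) (lt_irrefl m)
    have hinvL : ∀ p ∈ L, (PySem.Set.contains as p.1 = true ↔ ∃ c' ∈ P, pvMin p.2 = some c') := by
      intro p hp
      rw [has p.1]
      constructor
      · rintro ⟨q, hq, hq1, hc⟩
        rwa [pvKeyInj hnd hq hp hq1] at hc
      · intro hc
        exact ⟨p, hp, rfl, hc⟩
    have hfold : (c :: R').foldl (fun st comm => L.foldl (pvStepA comm) st) (dc, as)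
        = R'.foldl (fun st comm => L.foldl (pvStepA comm) st) (L.foldl (pvStepA c) (dc, as)) := rfl
    rw [hfold, pvInner c P hcP L dc as hnd hinvL hsm]
    have hdckeys : dc.contains c = false := by
      rw [Bool.eq_false_iff]
      intro hcon
      have := (PySem.Dict.contains_iff_mem_keys _ _).mp hcon
      rw [PySem.Dict.keys, hdc] at this
      simp only [List.map_map, List.mem_map, Function.comp] at this
      obtain ⟨c', hc', he⟩ := this
      exact hcP (he ▸ List.mem_of_mem_filter hc')
    have happ : P ++ c :: R' = (P ++ [c]) ++ R' := by simp
    rcases hM : L.filter (fun p => pvMin p.2 == some c) with _ | ⟨p0, M'⟩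
    · -- no node has minimal community c
      have hcnm : c ∉ pvMins L := by
        intro hc
        obtain ⟨p, hp, hm⟩ := List.mem_filterMap.mp hc
        have : p ∈ L.filter (fun p => pvMin p.2 == some c) :=
          List.mem_filter.mpr ⟨hp, by simp [hm]⟩
        rw [hM] at this
        cases this
      rw [hM]
      simp only [List.foldl_nil, List.map_nil]
      rw [happ]
      rw [ihR (P ++ [c]) dc (PySem.Set.update as [])]
      · rw [happ] at hS; exact hS
      · rw [hdc]
        simp [List.filter_append, hcnm]
      · intro n
        have : PySem.Set.update as [] = as := rfl
        rw [this, has n]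
        constructor
        · rintro ⟨p, hp, h1, c', hc', hm⟩
          exact ⟨p, hp, h1, c', List.mem_append_left _ hc', hm⟩
        · rintro ⟨p, hp, h1, c', hc', hm⟩
          rcases List.mem_append.mp hc' with h | h
          · exact ⟨p, hp, h1, c', h, hm⟩
          · rcases List.mem_cons.mp h with h | h
            · subst h
              have : p ∈ L.filter (fun p => pvMin p.2 == some c') :=
                List.mem_filter.mpr ⟨hp, by simp [hm]⟩
              rw [hM] at this
              cases this
            · cases h
    · -- the nodes with minimal community c form the new group
      have hMne : L.filter (fun p => pvMin p.2 == some c) ≠ [] := by rw [hM]; simp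
      have hcm : c ∈ pvMins L := by
        have hp0 : p0 ∈ L.filter (fun p => pvMin p.2 == some c) := by rw [hM]; simp
        obtain ⟨hp0L, hp0m⟩ := List.mem_filter.mp hp0
        exact List.mem_filterMap.mpr ⟨p0, hp0L, by simpa using hp0m⟩
      have hmapfold :
          (L.filter (fun p => pvMin p.2 == some c)).foldl
              (fun dc p => dc.modify c [] (fun l => l ++ [p.1])) dc
            = dc.insert c (pvGroup L c) := by
        have h2 := List.foldl_map (f := (Prod.fst : Int × List Int → Int))
          (g := fun (dc : PySem.Dict Int (List Int)) n => dc.modify c [] (fun l => l ++ [n]))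
          (l := L.filter (fun p => pvMin p.2 == some c)) (init := dc)
        refine h2.symm.trans ?_
        rw [pvFoldModify c _ dc (by simpa using hMne),
          PySem.Dict.getD_of_not_contains _ _ hdckeys]
        rfl
      rw [hmapfold, happ]
      rw [ihR (P ++ [c]) _ _]
      · rw [happ] at hS; exact hS
      · rw [PySem.Dict.items_insert_of_not_contains _ _ hdckeys, hdc]
        simp [List.filter_append, hcm]
      · intro n
        constructor
        · intro hcon
          rcases (PySem.Set.mem_update _ _ _).mp ((PySem.Set.contains_iff _ _).mp hcon) with h | h
          · obtain ⟨p, hp, h1, c', hc', hm⟩ := (has n).mp ((PySem.Set.contains_iff _ _).mpr h)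
            exact ⟨p, hp, h1, c', List.mem_append_left _ hc', hm⟩
          · obtain ⟨p, hp, h1⟩ := List.mem_map.mp h
            obtain ⟨hpL, hpm⟩ := List.mem_filter.mp hp
            exact ⟨p, hpL, h1, c, by simp, by simpa using hpm⟩
        · rintro ⟨p, hp, h1, c', hc', hm⟩
          apply (PySem.Set.contains_iff _ _).mpr
          apply (PySem.Set.mem_update _ _ _).mpr
          rcases List.mem_append.mp hc' with h | h
          · exact Or.inl ((PySem.Set.contains_iff _ _).mp ((has n).mpr ⟨p, hp, h1, c', h, hm⟩))
          · rcases List.mem_cons.mp h with h | h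
            · subst h
              exact Or.inr (List.mem_map.mpr
                ⟨p, List.mem_filter.mpr ⟨hp, by simp [hm]⟩, h1⟩)
            · cases h

theorem pvA_eq_canon (md : List (Int × List Int)) :
    make_disjoint_clustering md = pvCanon (PySem.Dict.ofList md).items := by
  unfold make_disjoint_clustering pvCanon
  dsimp only
  have hnd : ((PySem.Dict.ofList md).items.map Prod.fst).Nodup :=
    PySem.Dict.nodup_keys_ofList md
  have hout := pvOuter (PySem.Dict.ofList md).items hnd
    (PySem.List.sorted_ofList_pairwise_lt _)
    (pvS (PySem.Dict.ofList md).items) [] PySem.Dict.empty PySem.Set.empty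
    rfl rfl (by intro n; simp [PySem.Set.contains, PySem.Set.empty])
  rw [PySem.Dict.values]
  show (List.foldl _ (PySem.Dict.empty, PySem.Set.empty)
      (pvS (PySem.Dict.ofList md).items)).1.items.map (fun x => x.2) = _
  rw [hout]
  simp

-- B's grouping loop: lookups
theorem pvB_getD (c : Int) :
    ∀ (ls : List (Int × List Int)) (g : PySem.Dict Int (List Int)),
    (ls.foldl pvStepB g).getD c [] = g.getD c [] ++ pvGroup ls c := by
  intro ls
  induction ls with
  | nil => intro g; simp [pvGroup]
  | cons p t ih =>
    intro g
    rw [List.foldl_cons, ih]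
    unfold pvStepB pvGroup pvMin
    cases hm : PySem.List.min? p.2 (fun x => x) with
    | none => simp [hm]
    | some m =>
      by_cases hc : m = c
      · subst hc
        simp [hm, PySem.Dict.getD_insert_self]
      · rw [PySem.Dict.getD_insert_of_ne _ _ _ (Ne.symm hc)]
        simp [hm, hc]

-- B's grouping loop: keys
theorem pvB_keys :
    ∀ (ls : List (Int × List Int)) (g : PySem.Dict Int (List Int)),
    (ls.foldl pvStepB g).keys = PySem.Set.update g.keys (pvMins ls) := by
  intro ls
  induction ls with
  | nil => intro g; simp [pvMins, PySem.Set.update]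
  | cons p t ih =>
    intro g
    rw [List.foldl_cons, ih]
    unfold pvStepB pvMins
    cases hm : PySem.List.min? p.2 (fun x => x) with
    | none => simp [pvMin, hm]
    | some m =>
      have hkeys : (g.insert m (g.getD m [] ++ [p.1])).keys = PySem.Set.add g.keys m := by
        by_cases hcm : g.contains m = true
        · rw [PySem.Dict.keys_insert_of_contains _ _ hcm,
            PySem.Set.add_of_mem ((PySem.Dict.contains_iff_mem_keys _ _).mp hcm)]
        · rw [PySem.Dict.keys_insert_of_not_contains _ _ (by simpa using hcm),
            PySem.Set.add_of_not_mem (fun hmem => hcm ((PySem.Dict.contains_iff_mem_keys _ _).mpr hmem))]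
      rw [hkeys]
      simp [pvMin, hm, PySem.Set.update_cons]

theorem pvMins_sub (L : List (Int × List Int)) {c : Int} (h : c ∈ pvMins L) :
    c ∈ L.flatMap (fun p => p.2) := by
  obtain ⟨p, hp, hmin⟩ := List.mem_filterMap.mp h
  exact List.mem_flatMap.mpr ⟨p, hp, PySem.List.min?_mem hmin⟩

theorem pvSortedMins (L : List (Int × List Int)) :
    PySem.List.sorted (PySem.Set.ofList (pvMins L)) (fun x => x) false
      = (pvS L).filter (fun c => decide (c ∈ pvMins L)) := by
  apply PySem.List.sorted_eq_of_perm_of_pairwise_lt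
  · have hpwS : (pvS L).Pairwise (· < ·) := PySem.List.sorted_ofList_pairwise_lt _
    have hndS : (pvS L).Nodup := hpwS.imp (fun h => ne_of_lt h)
    apply (List.perm_ext_iff_of_nodup (hndS.filter _) (PySem.Set.nodup_ofList _)).mpr
    intro c
    simp only [List.mem_filter, PySem.Set.mem_ofList, decide_eq_true_eq]
    constructor
    · rintro ⟨_, h⟩; exact h
    · intro h
      refine ⟨?_, h⟩
      have : c ∈ L.flatMap (fun p => p.2) := pvMins_sub L h
      simp [pvS, PySem.List.mem_sorted, PySem.Set.mem_ofList, this]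
  · exact (PySem.List.sorted_ofList_pairwise_lt _).filter _

theorem pvB_eq_canon (md : List (Int × List Int)) :
    make_disjoint_clustering_alt md = pvCanon (PySem.Dict.ofList md).items := by
  unfold make_disjoint_clustering_alt pvCanon
  dsimp only
  have hkeys : ((PySem.Dict.ofList md).items.foldl pvStepB PySem.Dict.empty).keys
      = PySem.Set.ofList (pvMins (PySem.Dict.ofList md).items) := by
    rw [pvB_keys]
    simp [PySem.Set.update_nil_left]
  rw [hkeys, pvSortedMins]
  apply List.map_congr_left
  intro c _
  rw [pvB_getD]
  simp

-- ===== VERDICT (by name: the statement is the Claim_ definition above) =====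
theorem make_disjoint_clustering_spec : Claim_equal_make_disjoint_clustering := by
  intro md _
  unfold Spec_make_disjoint_clustering
  rw [pvA_eq_canon, pvB_eq_canon]
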